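-- pv_equiv track=rewrite | github.com/arthurflor23/spelling-correction | src/data/preproc.py | generate_ngram_sentences
-- ===== SOURCE A (Python) =====
-- def generate_ngram_sentences(sentence):
--     """
--     Generate sentences combinations (like ngrams).
--     i.e.:
--     original sentence: I like code .
--         > sentence 1 : I like
--         > sentence 2 : I like code .
--         > sentence 3 : like
--         > sentence 4 : like code .
--         > sentence 5 : code .
--     """
--
--     tokens = sentence.split()
--     ngrams = []
--
--     for y in range(len(tokens)):
--         new_sentence = True
--         support_text = ""
--
--         for x in range(y, len(tokens)):
--             if len(tokens[x]) < 3 and not sentence.endswith(tokens[x]):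
--                 support_text += f" {tokens[x]}"
--                 continue
--
--             last = ""
--             if x > y and len(ngrams) > 0 and not new_sentence:
--                 last = ngrams[-1]
--
--             ngrams.append(f"{last}{support_text} {tokens[x]}".strip())
--             new_sentence = False
--             support_text = ""
--
--     return ngrams
-- ===== SOURCE B (Python) =====
-- def generate_ngram_sentences(sentence):
--     tokens = sentence.split()
--     n = len(tokens)
--     return [" ".join(tokens[y:x + 1])
--             for y in range(n)
--             for x in range(y, n)
--             if len(tokens[x]) >= 3 or sentence.endswith(tokens[x])]
-- ===== Notes on version B (the rewrite author's own statement) =====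
-- stated objective: simpler
-- what changed: B drops A's incremental inner-loop state (support_text accumulator, new_sentence flag, ngrams[-1] reuse) and rebuilds every output sentence directly as the space-joined slice tokens[y:x+1] for the index pairs passing the emit condition, as a single comprehension.
import Mathlib
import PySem

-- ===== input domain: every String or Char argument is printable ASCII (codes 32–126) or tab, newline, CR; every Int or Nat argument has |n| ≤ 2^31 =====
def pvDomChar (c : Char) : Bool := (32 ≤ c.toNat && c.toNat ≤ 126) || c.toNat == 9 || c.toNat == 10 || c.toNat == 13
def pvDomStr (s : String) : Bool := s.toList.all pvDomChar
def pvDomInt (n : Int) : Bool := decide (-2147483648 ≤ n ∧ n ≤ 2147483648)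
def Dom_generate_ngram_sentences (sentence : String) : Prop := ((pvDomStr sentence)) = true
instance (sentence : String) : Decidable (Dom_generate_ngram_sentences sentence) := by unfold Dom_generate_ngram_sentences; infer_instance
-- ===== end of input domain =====

-- B removes A's incremental state (support_text / new_sentence / ngrams[-1]) and rebuilds each
-- output sentence directly as " ".join(tokens[y:x+1]) over the same index pairs (objective: simpler).

-- ===== PORT A =====
-- A-side helper: the body of the inner `for x in range(y, len(tokens))` loop;
-- state is (ngrams, new_sentence, support_text), kept exactly as in the Python.
def pvAStep (s : List Char) (toks : List (List Char)) (y : Int)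
    (st : List (List Char) × Bool × List Char) (x : Int) : List (List Char) × Bool × List Char :=
  let tok := PySem.List.pyGetD toks x []
  if PySem.Chars.len tok < 3 ∧ PySem.Chars.endswith s tok = false then
    -- support_text += f" {tokens[x]}"; continue
    (st.1, st.2.1, st.2.2 ++ ' ' :: tok)
  else
    -- last = ngrams[-1] if x > y and len(ngrams) > 0 and not new_sentence else ""
    let last := if y < x ∧ 0 < st.1.length ∧ st.2.1 = false then PySem.List.pyGetD st.1 (-1) [] else []
    -- ngrams.append(f"{last}{support_text} {tokens[x]}".strip()); new_sentence = False; support_text = ""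
    (st.1 ++ [PySem.Chars.strip (last ++ st.2.2 ++ ' ' :: tok)], false, [])

def generate_ngram_sentences (sentence : String) : List String :=
  let s := sentence.toList
  let toks := PySem.Chars.split₀ s
  let n : Int := toks.length
  let ngrams :=
    (PySem.List.pyRange 0 n).foldl
      (fun ng y => ((PySem.List.pyRange y n).foldl (pvAStep s toks y) (ng, true, [])).1) []
  ngrams.map String.ofList

-- ===== PORT B =====
def generate_ngram_sentences_alt (sentence : String) : List String :=
  let s := sentence.toList
  let toks := PySem.Chars.split₀ s
  let n : Int := toks.length
  (PySem.List.pyRange 0 n).flatMap (fun y =>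
    (PySem.List.pyRange y n).filterMap (fun x =>
      let tok := PySem.List.pyGetD toks x []
      if 3 ≤ PySem.Chars.len tok ∨ PySem.Chars.endswith s tok = true then
        some (String.ofList (PySem.Chars.join [' '] (PySem.List.slice toks (some y) (some (x + 1)))))
      else none))

-- ===== PRECONDITION & SPEC =====
def Spec_generate_ngram_sentences (sentence : String) (out : List String) : Prop := out = generate_ngram_sentences_alt sentence
instance (sentence : String) (out : List String) : Decidable (Spec_generate_ngram_sentences sentence out) := by unfold Spec_generate_ngram_sentences; infer_instance

-- ===== CLAIM (what is proved, stated in full; the proofs are below) =====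
def Claim_equal_generate_ngram_sentences : Prop := ∀ (sentence : String), Dom_generate_ngram_sentences sentence → Spec_generate_ngram_sentences sentence (generate_ngram_sentences sentence)

-- ===== LEMMAS AND PROOFS =====

def pvSpaced (ts : List (List Char)) : List Char := (ts.map (fun t => ' ' :: t)).flatten
def pvSeg (toks : List (List Char)) (i j : Nat) : List (List Char) := (toks.drop i).take (j - i)
def pvTokOk (t : List Char) : Prop := t ≠ [] ∧ ∀ c ∈ t, PySem.Chars.isspace c = false
lemma pvSpaced_append (ts us : List (List Char)) :
    pvSpaced (ts ++ us) = pvSpaced ts ++ pvSpaced us := by simp [pvSpaced]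

lemma pv_join_cons (t : List Char) (ts : List (List Char)) :
    PySem.Chars.join [' '] (t :: ts) = t ++ pvSpaced ts := by
  induction ts generalizing t with
  | nil => simp [PySem.Chars.join_singleton, pvSpaced]
  | cons u us ih => simp [PySem.Chars.join_cons_cons, ih, pvSpaced]

lemma pv_join_append (A B : List (List Char)) (h : A ≠ []) :
    PySem.Chars.join [' '] (A ++ B) = PySem.Chars.join [' '] A ++ pvSpaced B := by
  obtain ⟨t, ts, rfl⟩ := List.exists_cons_of_ne_nil h
  simp [pv_join_cons, pvSpaced]

lemma pv_strip_space (cs : List Char) :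
    PySem.Chars.strip (' ' :: cs) = PySem.Chars.strip cs := by
  simp [PySem.Chars.strip, PySem.Chars.lstrip, show PySem.Chars.isspace ' ' = true from rfl]

lemma pv_filterMap_if {α β : Type} (p : α → Bool) (f : α → β) (l : List α) :
    l.filterMap (fun x => if p x then some (f x) else none) = (l.filter p).map f := by
  induction l with
  | nil => rfl
  | cons a l ih => by_cases h : p a <;> simp [h, ih]

lemma pvSeg_ok (toks : List (List Char)) (h : ∀ t ∈ toks, pvTokOk t) (i j : Nat) :
    ∀ t ∈ pvSeg toks i j, pvTokOk t := by
  intro t ht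
  exact h t (List.mem_of_mem_drop (List.mem_of_mem_take ht))

lemma pvSeg_snoc (toks : List (List Char)) (i a : Nat) (h1 : i ≤ a) (h2 : a < toks.length) :
    pvSeg toks i a ++ [toks.getD a []] = pvSeg toks i (a + 1) := by
  have hlen : a - i < (toks.drop i).length := by simp [List.length_drop]; omega
  have : a + 1 - i = (a - i) + 1 := by omega
  rw [pvSeg, pvSeg, this, List.take_add_one]
  have hg : toks.getD a [] = (toks.drop i)[a - i] := by
    rw [List.getElem_drop, List.getD_eq_getElem toks [] (by omega)]
    congr 1; omega
  simp [List.getElem?_eq_getElem hlen]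
  rw [List.getElem?_eq_getElem h2]
  simp
  congr 1
  omega

lemma pvSeg_glue (toks : List (List Char)) (i j k : Nat) (h1 : i ≤ j) (h2 : j ≤ k)
    (_h3 : j ≤ toks.length) : pvSeg toks i j ++ pvSeg toks j k = pvSeg toks i k := by
  unfold pvSeg
  have hd : toks.drop j = (toks.drop i).drop (j - i) := by rw [List.drop_drop]; congr 1; omega
  have hk : k - i = (j - i) + (k - j) := by omega
  rw [hd, hk, List.take_add]

lemma pvSeg_ne_nil (toks : List (List Char)) (y a : Nat) (h1 : y ≤ a) (h2 : a < toks.length) :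
    pvSeg toks y (a + 1) ≠ [] := by
  simp [pvSeg]
  constructor <;> omega

lemma pv_getD_neg_one {α : Type} (xs : List α) (p : α) (d : α) :
    PySem.List.pyGetD (xs ++ [p]) (-1) d = p := by
  simp [PySem.List.pyGetD, PySem.List.pyGet?, PySem.List.pyIdx?]

lemma pv_lstrip_nospace (c : Char) (cs : List Char) (hc : PySem.Chars.isspace c = false) :
    PySem.Chars.lstrip (c :: cs) = c :: cs := by
  simp [PySem.Chars.lstrip, hc]

lemma pv_rstrip_nospace (ds : List Char) (d : Char) (hd : PySem.Chars.isspace d = false) :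
    PySem.Chars.rstrip (ds ++ [d]) = ds ++ [d] := by
  simp [PySem.Chars.rstrip, hd]

lemma pv_join_last (us : List (List Char)) (hne : us ≠ []) (h : ∀ t ∈ us, pvTokOk t) :
    ∃ X d, PySem.Chars.join [' '] us = X ++ [d] ∧ PySem.Chars.isspace d = false := by
  obtain ⟨init, u, rfl⟩ : ∃ init u, us = init ++ [u] := by
    rcases List.eq_nil_or_concat us with h1 | ⟨L, b, rfl⟩
    · exact absurd h1 hne
    · exact ⟨L, b, by simp⟩
  have hu : pvTokOk u := h u (by simp)
  obtain ⟨du_init, du, hu_eq⟩ : ∃ ds d, u = ds ++ [d] := by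
    rcases List.eq_nil_or_concat u with h1 | ⟨L, b, hb⟩
    · exact absurd h1 hu.1
    · exact ⟨L, b, by simp [hb]⟩
  have hdu : PySem.Chars.isspace du = false := hu.2 du (by simp [hu_eq])
  cases init with
  | nil =>
    refine ⟨du_init, du, ?_, hdu⟩
    simp [PySem.Chars.join_singleton, hu_eq]
  | cons t ts =>
    refine ⟨t ++ pvSpaced ts ++ ' ' :: du_init, du, ?_, hdu⟩
    rw [show t :: ts ++ [u] = t :: (ts ++ [u]) from rfl, pv_join_cons, pvSpaced_append, hu_eq]
    simp [pvSpaced]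

lemma pv_strip_join (us : List (List Char)) (hne : us ≠ []) (h : ∀ t ∈ us, pvTokOk t) :
    PySem.Chars.strip (PySem.Chars.join [' '] us) = PySem.Chars.join [' '] us := by
  cases us with
  | nil => exact absurd rfl hne
  | cons t ts =>
    have ht := h t (by simp)
    obtain ⟨c, t0, rfl⟩ : ∃ c t0, t = c :: t0 := by
      cases t with
      | nil => exact absurd rfl ht.1
      | cons c t0 => exact ⟨c, t0, rfl⟩
    have hc : PySem.Chars.isspace c = false := ht.2 c (by simp)
    have hj : PySem.Chars.join [' '] ((c :: t0) :: ts) = c :: (t0 ++ pvSpaced ts) := by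
      rw [pv_join_cons]; simp
    obtain ⟨X, d, hXd, hd⟩ := pv_join_last _ hne h
    rw [PySem.Chars.strip, hj, pv_lstrip_nospace c _ hc, ← hj, hXd, pv_rstrip_nospace X d hd]

lemma pv_split₀_go_ok : ∀ (cs cur : List Char) (acc : List (List Char)),
    (∀ c ∈ cur, PySem.Chars.isspace c = false) →
    (∀ t ∈ acc, pvTokOk t) →
    ∀ t ∈ PySem.Chars.split₀.go cs cur acc, pvTokOk t := by
  intro cs
  induction cs with
  | nil =>
    intro cur acc hcur hacc t ht
    rw [PySem.Chars.split₀.go] at ht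
    by_cases hc : cur.isEmpty
    · rw [if_pos hc] at ht
      exact hacc t (List.mem_reverse.mp ht)
    · rw [if_neg hc] at ht
      rcases List.mem_cons.mp (List.mem_reverse.mp ht) with h1 | h1
      · subst h1
        refine ⟨by simpa using (List.isEmpty_eq_false_iff.mp (by simpa using hc)), ?_⟩
        intro d hd; exact hcur d (List.mem_reverse.mp hd)
      · exact hacc t h1
  | cons c rest ih =>
    intro cur acc hcur hacc t ht
    rw [PySem.Chars.split₀.go] at ht
    by_cases hsp : PySem.Chars.isspace c = true
    · rw [if_pos hsp] at ht
      by_cases hc : cur.isEmpty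
      · rw [if_pos hc] at ht
        exact ih [] acc (by simp) hacc t ht
      · rw [if_neg hc] at ht
        refine ih [] (cur.reverse :: acc) (by simp) ?_ t ht
        intro u hu
        rcases List.mem_cons.mp hu with h1 | h1
        · subst h1
          refine ⟨by simpa using (List.isEmpty_eq_false_iff.mp (by simpa using hc)), ?_⟩
          intro d hd; exact hcur d (List.mem_reverse.mp hd)
        · exact hacc u h1
    · rw [if_neg hsp] at ht
      refine ih (c :: cur) acc ?_ hacc t ht
      intro d hd
      rcases List.mem_cons.mp hd with h1 | h1
      · subst h1; simpa using hsp
      · exact hcur d h1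

lemma pv_split₀_ok (s : List Char) : ∀ t ∈ PySem.Chars.split₀ s, pvTokOk t := by
  exact pv_split₀_go_ok s [] [] (by simp) (by simp)

def pvJ (toks : List (List Char)) (y x : Nat) : List Char :=
  PySem.Chars.join [' '] (pvSeg toks y (x + 1))

lemma pv_pyRange_natCast : ∀ (k a n : Nat), n - a = k →
    PySem.List.pyRange (a : Int) (n : Int) = List.map (fun i : Nat => (i : Int)) (List.range' a k) := by
  intro k
  induction k with
  | zero =>
    intro a n h
    have hge : ¬((a : Int) < (n : Int)) := by omega
    simp [PySem.List.pyRange, hge]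
  | succ k ih =>
    intro a n h
    have hlt : (a : Int) < (n : Int) := by omega
    rw [PySem.List.pyRange_one_cons hlt, List.range'_succ]
    have h2 : ((a : Int) + 1) = ((a + 1 : Nat) : Int) := by omega
    rw [h2, ih (a + 1) n (by omega)]
    rfl

lemma pv_spaced_single (t : List Char) : pvSpaced [t] = ' ' :: t := by simp [pvSpaced]

lemma pv_emit_fresh (toks : List (List Char)) (hok : ∀ t ∈ toks, pvTokOk t)
    (y a : Nat) (h1 : y ≤ a) (h2 : a < toks.length) :
    PySem.Chars.strip (pvSpaced (pvSeg toks y a) ++ ' ' :: toks.getD a []) = pvJ toks y a := by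
  have e1 : pvSpaced (pvSeg toks y a) ++ ' ' :: toks.getD a []
      = pvSpaced (pvSeg toks y (a + 1)) := by
    rw [← pvSeg_snoc toks y a h1 h2, pvSpaced_append, pv_spaced_single]
  rw [e1]
  obtain ⟨t, ts, hseg⟩ : ∃ t ts, pvSeg toks y (a + 1) = t :: ts := by
    cases hs : pvSeg toks y (a + 1) with
    | nil => exact absurd hs (pvSeg_ne_nil toks y a h1 h2)
    | cons t ts => exact ⟨t, ts, rfl⟩
  rw [pvJ, hseg]
  have e2 : pvSpaced (t :: ts) = ' ' :: PySem.Chars.join [' '] (t :: ts) := by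
    rw [show (t :: ts) = [t] ++ ts from rfl, pvSpaced_append, pv_spaced_single,
      show [t] ++ ts = t :: ts from rfl, pv_join_cons]
    simp
  rw [e2, pv_strip_space, pv_strip_join (t :: ts) (by simp) (by rw [← hseg]; exact pvSeg_ok toks hok y (a + 1))]

lemma pv_emit_cont (toks : List (List Char)) (hok : ∀ t ∈ toks, pvTokOk t)
    (y q a : Nat) (h0 : y ≤ q) (h1 : q < a) (h2 : a < toks.length) :
    PySem.Chars.strip ((pvJ toks y q ++ pvSpaced (pvSeg toks (q + 1) a)) ++ ' ' :: toks.getD a [])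
      = pvJ toks y a := by
  rw [List.append_assoc]
  have e1 : pvSpaced (pvSeg toks (q + 1) a) ++ ' ' :: toks.getD a []
      = pvSpaced (pvSeg toks (q + 1) (a + 1)) := by
    rw [← pvSeg_snoc toks (q + 1) a (by omega) h2, pvSpaced_append, pv_spaced_single]
  have hne : pvSeg toks y (q + 1) ≠ [] := pvSeg_ne_nil toks y q h0 (by omega)
  have e2 : pvJ toks y q ++ pvSpaced (pvSeg toks (q + 1) (a + 1))
      = PySem.Chars.join [' '] (pvSeg toks y (q + 1) ++ pvSeg toks (q + 1) (a + 1)) := by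
    rw [pv_join_append _ _ hne, pvJ]
  rw [e1, e2, pvSeg_glue toks y (q + 1) (a + 1) (by omega) (by omega) (by omega)]
  have hne2 : pvSeg toks y (a + 1) ≠ [] := pvSeg_ne_nil toks y a (by omega) h2
  rw [pvJ, pv_strip_join _ hne2 (pvSeg_ok toks hok y (a + 1))]

def pvGood (s : List Char) (toks : List (List Char)) (x : Nat) : Bool :=
  (3 ≤ (toks.getD x []).length) || PySem.Chars.endswith s (toks.getD x [])

def pvRow (s : List Char) (toks : List (List Char)) (y a : Nat) : List (List Char) :=
  ((List.range' a (toks.length - a)).filter (pvGood s toks)).map (fun x => pvJ toks y x)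

lemma pv_skip_cond (s : List Char) (toks : List (List Char)) (a : Nat)
    (hg : pvGood s toks a = false) :
    PySem.Chars.len (toks.getD a []) < 3 ∧ PySem.Chars.endswith s (toks.getD a []) = false := by
  simp [pvGood] at hg
  refine ⟨?_, hg.2⟩
  have := hg.1
  simp [PySem.Chars.len, List.getD]
  omega

lemma pv_emit_cond (s : List Char) (toks : List (List Char)) (a : Nat)
    (hg : pvGood s toks a = true) :
    ¬(PySem.Chars.len (toks.getD a []) < 3 ∧ PySem.Chars.endswith s (toks.getD a []) = false) := by
  simp [pvGood] at hg
  rintro ⟨h1, h2⟩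
  rcases hg with h3 | h3
  · simp [PySem.Chars.len] at h1; omega
  · simp [h3] at h2

lemma pvRow_zero (s : List Char) (toks : List (List Char)) (y a : Nat)
    (h : toks.length - a = 0) : pvRow s toks y a = [] := by
  simp [pvRow, h]

lemma pvRow_cons_skip (s : List Char) (toks : List (List Char)) (y a : Nat) {k : Nat}
    (h : toks.length - a = k + 1) (hg : pvGood s toks a = false) :
    pvRow s toks y a = pvRow s toks y (a + 1) := by
  rw [pvRow, pvRow, h, List.range'_succ, List.filter_cons, show toks.length - (a+1) = k from by omega]
  simp [hg]

lemma pvRow_cons_emit (s : List Char) (toks : List (List Char)) (y a : Nat) {k : Nat}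
    (h : toks.length - a = k + 1) (hg : pvGood s toks a = true) :
    pvRow s toks y a = pvJ toks y a :: pvRow s toks y (a + 1) := by
  rw [pvRow, pvRow, h, List.range'_succ, List.filter_cons, show toks.length - (a+1) = k from by omega]
  simp [hg]

lemma pv_inner_cont (s : List Char) (toks : List (List Char)) (hok : ∀ t ∈ toks, pvTokOk t)
    (y : Nat) : ∀ (k a q : Nat) (ng0 : List (List Char)), toks.length - a = k → y ≤ q → q < a →
    (((List.range' a k).foldl (fun st (x : Nat) => pvAStep s toks (y : Int) st (x : Int))
        (ng0 ++ [pvJ toks y q], false, pvSpaced (pvSeg toks (q + 1) a))).1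
      = (ng0 ++ [pvJ toks y q]) ++ pvRow s toks y a) := by
  intro k
  induction k with
  | zero =>
    intro a q ng0 hk hyq hqa
    simp [pvRow_zero s toks y a hk]
  | succ k ih =>
    intro a q ng0 hk hyq hqa
    have han : a < toks.length := by omega
    rw [List.range'_succ, List.foldl_cons]
    by_cases hg : pvGood s toks a = true
    · have hstep : pvAStep s toks (y : Int) (ng0 ++ [pvJ toks y q], false, pvSpaced (pvSeg toks (q + 1) a)) (a : Int)
          = ((ng0 ++ [pvJ toks y q]) ++ [pvJ toks y a], false, pvSpaced (pvSeg toks (a + 1) (a + 1))) := by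
        rw [pvAStep]
        simp only [PySem.List.pyGetD_natCast]
        rw [if_neg (pv_emit_cond s toks a hg)]
        have hcond : ((y : Int) < (a : Int) ∧ 0 < (ng0 ++ [pvJ toks y q]).length ∧ True) := by
          refine ⟨by omega, by simp, trivial⟩
        rw [if_pos hcond, pv_getD_neg_one]
        have : pvSeg toks (a + 1) (a + 1) = [] := by simp [pvSeg]
        rw [this, show pvSpaced [] = [] from rfl,
          pv_emit_cont toks hok y q a hyq hqa han]
      rw [hstep, ih (a + 1) a ((ng0 ++ [pvJ toks y q])) (by omega) (by omega) (by omega),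
        pvRow_cons_emit s toks y a hk hg]
      simp
    · have hg' : pvGood s toks a = false := by simpa using hg
      have hstep : pvAStep s toks (y : Int) (ng0 ++ [pvJ toks y q], false, pvSpaced (pvSeg toks (q + 1) a)) (a : Int)
          = (ng0 ++ [pvJ toks y q], false, pvSpaced (pvSeg toks (q + 1) (a + 1))) := by
        rw [pvAStep]
        simp only [PySem.List.pyGetD_natCast]
        rw [if_pos (pv_skip_cond s toks a hg')]
        rw [show (pvSpaced (pvSeg toks (q + 1) a) ++ ' ' :: toks.getD a [])
            = pvSpaced (pvSeg toks (q + 1) (a + 1)) from by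
          rw [← pvSeg_snoc toks (q + 1) a (by omega) han, pvSpaced_append, pv_spaced_single]]
      rw [hstep, ih (a + 1) q ng0 (by omega) hyq (by omega),
        pvRow_cons_skip s toks y a hk hg']

lemma pv_inner_fresh (s : List Char) (toks : List (List Char)) (hok : ∀ t ∈ toks, pvTokOk t)
    (y : Nat) : ∀ (k a : Nat) (ng0 : List (List Char)), toks.length - a = k → y ≤ a →
    (((List.range' a k).foldl (fun st (x : Nat) => pvAStep s toks (y : Int) st (x : Int))
        (ng0, true, pvSpaced (pvSeg toks y a))).1
      = ng0 ++ pvRow s toks y a) := by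
  intro k
  induction k with
  | zero =>
    intro a ng0 hk hya
    simp [pvRow_zero s toks y a hk]
  | succ k ih =>
    intro a ng0 hk hya
    have han : a < toks.length := by omega
    rw [List.range'_succ, List.foldl_cons]
    by_cases hg : pvGood s toks a = true
    · have hstep : pvAStep s toks (y : Int) (ng0, true, pvSpaced (pvSeg toks y a)) (a : Int)
          = (ng0 ++ [pvJ toks y a], false, pvSpaced (pvSeg toks (a + 1) (a + 1))) := by
        rw [pvAStep]
        simp only [PySem.List.pyGetD_natCast]
        rw [if_neg (pv_emit_cond s toks a hg)]
        have hcond : ¬((y : Int) < (a : Int) ∧ 0 < ng0.length ∧ true = false) := by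
          rintro ⟨-, -, h⟩; exact absurd h (by simp)
        rw [if_neg hcond]
        have : pvSeg toks (a + 1) (a + 1) = [] := by simp [pvSeg]
        rw [this, show pvSpaced [] = [] from rfl]
        rw [show ([] : List Char) ++ pvSpaced (pvSeg toks y a) ++ ' ' :: toks.getD a []
            = pvSpaced (pvSeg toks y a) ++ ' ' :: toks.getD a [] from by simp,
          pv_emit_fresh toks hok y a hya han]
      rw [hstep, pv_inner_cont s toks hok y k (a + 1) a ng0 (by omega) hya (by omega),
        pvRow_cons_emit s toks y a hk hg]
      simp
    · have hg' : pvGood s toks a = false := by simpa using hg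
      have hstep : pvAStep s toks (y : Int) (ng0, true, pvSpaced (pvSeg toks y a)) (a : Int)
          = (ng0, true, pvSpaced (pvSeg toks y (a + 1))) := by
        rw [pvAStep]
        simp only [PySem.List.pyGetD_natCast]
        rw [if_pos (pv_skip_cond s toks a hg')]
        rw [show (pvSpaced (pvSeg toks y a) ++ ' ' :: toks.getD a [])
            = pvSpaced (pvSeg toks y (a + 1)) from by
          rw [← pvSeg_snoc toks y a hya han, pvSpaced_append, pv_spaced_single]]
      rw [hstep, ih (a + 1) ng0 (by omega) (by omega),
        pvRow_cons_skip s toks y a hk hg']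

lemma pv_cond_iff (s : List Char) (toks : List (List Char)) (x : Nat) :
    (3 ≤ PySem.Chars.len (toks.getD x []) ∨ PySem.Chars.endswith s (toks.getD x []) = true)
      ↔ pvGood s toks x = true := by
  simp [pvGood, PySem.Chars.len, List.getD]

lemma pv_core (s : List Char) (toks : List (List Char)) (hok : ∀ t ∈ toks, pvTokOk t) :
    ((PySem.List.pyRange 0 (toks.length : Int)).foldl
        (fun ng y => ((PySem.List.pyRange y (toks.length : Int)).foldl (pvAStep s toks y) (ng, true, [])).1)
        []).map String.ofList
      = (PySem.List.pyRange 0 (toks.length : Int)).flatMap (fun y =>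
          (PySem.List.pyRange y (toks.length : Int)).filterMap (fun x =>
            let tok := PySem.List.pyGetD toks x []
            if 3 ≤ PySem.Chars.len tok ∨ PySem.Chars.endswith s tok = true then
              some (String.ofList (PySem.Chars.join [' '] (PySem.List.slice toks (some y) (some (x + 1)))))
            else none)) := by
  rw [show ((0 : Int)) = ((0 : Nat) : Int) from rfl, pv_pyRange_natCast (toks.length) 0 toks.length (by omega),
    List.foldl_map, List.flatMap_map]
  have hstep : ∀ (ng : List (List Char)) (y : Nat),
      ((PySem.List.pyRange (y : Int) (toks.length : Int)).foldl (pvAStep s toks (y : Int)) (ng, true, [])).1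
        = ng ++ pvRow s toks y y := by
    intro ng y
    rw [pv_pyRange_natCast (toks.length - y) y toks.length rfl, List.foldl_map]
    have h0 : pvSpaced (pvSeg toks y y) = [] := by simp [pvSeg, pvSpaced]
    rw [show ((ng, true, ([] : List Char))) = ((ng, true, pvSpaced (pvSeg toks y y))) from by rw [h0]]
    exact pv_inner_fresh s toks hok y (toks.length - y) y ng rfl le_rfl
  simp only [hstep]
  rw [PySem.List.foldl_append_eq_flatMap (fun y => pvRow s toks y y) _ []]
  simp only [List.nil_append, List.map_flatMap]
  congr 1
  funext y
  rw [pv_pyRange_natCast (toks.length - y) y toks.length rfl, List.filterMap_map]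
  have hfun : (fun x : Nat => (if 3 ≤ PySem.Chars.len (PySem.List.pyGetD toks (x : Int) []) ∨
        PySem.Chars.endswith s (PySem.List.pyGetD toks (x : Int) []) = true then
          some (String.ofList (PySem.Chars.join [' '] (PySem.List.slice toks (some (y : Int)) (some ((x : Int) + 1)))))
        else none))
      = fun x : Nat => if pvGood s toks x = true then some (String.ofList (pvJ toks y x)) else none := by
    funext x
    simp only [PySem.List.pyGetD_natCast]
    have hsl : PySem.List.slice toks (some (y : Int)) (some ((x : Int) + 1)) = pvSeg toks y (x + 1) := by
      rw [show ((x : Int) + 1) = ((x + 1 : Nat) : Int) from by push_cast; ring, PySem.List.slice_natCast]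
      rfl
    by_cases hg : pvGood s toks x = true
    · rw [if_pos ((pv_cond_iff s toks x).mpr hg), if_pos hg, hsl]
      rfl
    · rw [if_neg (fun hc => hg ((pv_cond_iff s toks x).mp hc)), if_neg hg]
  rw [show ((fun x : Int => (if 3 ≤ PySem.Chars.len (PySem.List.pyGetD toks x []) ∨
        PySem.Chars.endswith s (PySem.List.pyGetD toks x []) = true then
          some (String.ofList (PySem.Chars.join [' '] (PySem.List.slice toks (some (y : Int)) (some (x + 1)))))
        else none)) ∘ (fun i : Nat => (i : Int))) = _ from funext (fun x => congrFun hfun x)]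
  rw [pv_filterMap_if (pvGood s toks) (fun x => String.ofList (pvJ toks y x))]
  simp [pvRow, List.map_map, Function.comp]

-- ===== VERDICT (by name: the statement is the Claim_ definition above) =====
theorem generate_ngram_sentences_spec : Claim_equal_generate_ngram_sentences := by
  intro sentence _
  unfold Spec_generate_ngram_sentences
  exact pv_core sentence.toList (PySem.Chars.split₀ sentence.toList) (pv_split₀_ok sentence.toList)
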